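-- pv_equiv track=rewrite | github.com/rstanbaugh/crestron-cli | crestron_cli/main.py | _normalize_scene_target_token
-- ===== SOURCE A (Python) =====
-- def _normalize_scene_target_token(target: str) -> str:
--     token = target.strip()
--     lowered = token.lower()
--     for prefix in ("scene=", "id=", "scene:", "id:"):
--         if lowered.startswith(prefix):
--             value = token[len(prefix):].strip()
--             if value:
--                 return value
--     return token
-- ===== SOURCE B (Python) =====
-- def _normalize_scene_target_token(target: str) -> str:
--     token = target.strip()
--     for sep in "=:":
--         i = token.find(sep)
--         if i != -1 and token[:i].lower() in ("scene", "id"):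
--             rest = token[i + 1:].strip()
--             if rest:
--                 return rest
--     return token
-- ===== Notes on version B (the rewrite author's own statement) =====
-- stated objective: idiomatic
-- what changed: A loops over the four lowered prefix strings slicing per prefix; B instead runs str.find for each of the two separator characters and checks that the text before the found position is one of the two keywords case-insensitively, slicing once after the separator.
import Mathlib
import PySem

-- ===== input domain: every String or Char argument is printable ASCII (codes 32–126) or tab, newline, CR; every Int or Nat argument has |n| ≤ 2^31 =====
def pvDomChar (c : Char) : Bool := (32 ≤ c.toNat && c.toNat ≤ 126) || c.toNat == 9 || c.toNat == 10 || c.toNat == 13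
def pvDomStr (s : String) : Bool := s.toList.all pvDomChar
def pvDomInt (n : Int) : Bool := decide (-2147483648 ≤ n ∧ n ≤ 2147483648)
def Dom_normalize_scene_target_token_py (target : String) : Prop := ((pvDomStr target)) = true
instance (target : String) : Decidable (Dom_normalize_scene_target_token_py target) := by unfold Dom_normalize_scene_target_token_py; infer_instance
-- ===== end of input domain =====

-- B replaces A's four-way prefix loop by a two-way scan for the first '='/':' separator with a
-- keyword check on the text before it (objective: alternative/idiomatic; same cost).

-- ===== PORT A =====
-- for prefix in ("scene=", "id=", "scene:", "id:"): if lowered.startswith(prefix): …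
def pvALoop (token lowered : List Char) : List (List Char) → List Char
  | [] => token
  | p :: ps =>
    if PySem.Chars.startswith lowered p then
      let value := PySem.Chars.strip (PySem.List.slice token (some (p.length : Int)) none)
      if value ≠ [] then value else pvALoop token lowered ps
    else pvALoop token lowered ps

def normalize_scene_target_token_py (target : String) : String :=
  let token := PySem.Chars.strip target.toList
  let lowered := PySem.Chars.lower token
  String.ofList (pvALoop token lowered ["scene=".toList, "id=".toList, "scene:".toList, "id:".toList])

-- ===== PORT B =====
-- for sep in "=:": i = token.find(sep); if i != -1 and token[:i].lower() in ("scene", "id"): …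
def pvBLoop (token : List Char) : List Char → List Char
  | [] => token
  | sep :: seps =>
    let i := PySem.Chars.find token [sep]
    if i ≠ -1 ∧ PySem.Chars.lower (PySem.List.slice token none (some i)) ∈ ["scene".toList, "id".toList] then
      let rest := PySem.Chars.strip (PySem.List.slice token (some (i + 1)) none)
      if rest ≠ [] then rest else pvBLoop token seps
    else pvBLoop token seps

def normalize_scene_target_token_py_alt (target : String) : String :=
  let token := PySem.Chars.strip target.toList
  String.ofList (pvBLoop token ['=', ':'])

-- ===== PRECONDITION & SPEC =====
def Spec_normalize_scene_target_token_py (target : String) (out : String) : Prop := out = normalize_scene_target_token_py_alt target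
instance (target : String) (out : String) : Decidable (Spec_normalize_scene_target_token_py target out) := by unfold Spec_normalize_scene_target_token_py; infer_instance

-- ===== CLAIM (what is proved, stated in full; the proofs are below) =====
def Claim_equal_normalize_scene_target_token_py : Prop := ∀ (target : String), Dom_normalize_scene_target_token_py target → Spec_normalize_scene_target_token_py target (normalize_scene_target_token_py target)

-- ===== LEMMAS AND PROOFS =====

-- lowering a character yields a non-letter c only for c itself
theorem pvLowerChar_eq_iff (d c : Char) (h1 : ¬('a' ≤ c ∧ c ≤ 'z')) (h2 : ¬('A' ≤ c ∧ c ≤ 'Z')) :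
    PySem.Chars.lowerChar d = c ↔ d = c := by
  unfold PySem.Chars.lowerChar PySem.Chars.isupper
  split_ifs with h
  · simp only [Bool.and_eq_true, decide_eq_true_eq] at h
    have hA : 'A'.toNat = 65 := rfl
    have hZ : 'Z'.toNat = 90 := rfl
    have hd1 : 'A'.toNat ≤ d.toNat := by
      have := h.1; simpa [Char.le_def, UInt32.le_iff_toNat_le] using this
    have hd2 : d.toNat ≤ 'Z'.toNat := by
      have := h.2; simpa [Char.le_def, UInt32.le_iff_toNat_le] using this
    have hv : (Char.ofNat (d.toNat + 32)).toNat = d.toNat + 32 := by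
      rw [Char.toNat_ofNat, if_pos]
      left; omega
    constructor
    · intro he
      exfalso; apply h1
      have hc : c.toNat = d.toNat + 32 := by rw [← he]; exact hv
      constructor <;> simp [Char.le_def, UInt32.le_iff_toNat_le] <;> omega
    · intro he; exfalso; exact h2 (he ▸ h)
  · simp

-- B's (find-position, lowered-head) test agrees with A's lowered-prefix test, one keyword w at a time
theorem pvCond_iff (t w : List Char) (c : Char)
    (hc1 : PySem.Chars.lowerChar c = c)
    (hc2 : ∀ d, PySem.Chars.lowerChar d = c → d = c)
    (hcw : c ∉ w) :
    (PySem.Chars.find t [c] = (w.length : Int) ∧ PySem.Chars.lower (List.take w.length t) = w)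
    ↔ PySem.Chars.startswith (PySem.Chars.lower t) (w ++ [c]) = true := by
  rw [PySem.Chars.startswith_iff]
  constructor
  · rintro ⟨hf, hl⟩
    have h0 : 0 ≤ PySem.Chars.find t [c] := by rw [hf]; exact Int.natCast_nonneg _
    obtain ⟨hpre, -⟩ := PySem.Chars.find_spec h0
    rw [hf] at hpre
    simp only [Int.toNat_natCast] at hpre
    obtain ⟨r, hr⟩ := hpre
    have hsplit : t = t.take w.length ++ ([c] ++ r) := by
      conv_lhs => rw [← List.take_append_drop w.length t]
      rw [← hr]
    rw [hsplit]
    unfold PySem.Chars.lower at hl ⊢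
    refine ⟨List.map PySem.Chars.lowerChar r, ?_⟩
    simp [hl, hc1]
  · intro h
    have hpfx := List.prefix_iff_getElem?.mp h
    have hlen : w.length + 1 ≤ t.length := by
      have := h.length_le
      simpa [PySem.Chars.lower] using this
    have hget : ∀ j (hj : j < w.length), PySem.Chars.lowerChar (t[j]'(by omega)) = w[j]'hj := by
      intro j hj
      have := hpfx j (by simp; omega)
      simp only [PySem.Chars.lower, List.getElem?_map] at this
      rw [List.getElem?_eq_getElem (by omega)] at this
      simp only [Option.map_some, Option.some.injEq] at this
      rw [this, List.getElem_append_left hj]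
    have hgetc : t[w.length]'(by omega) = c := by
      apply hc2
      have := hpfx w.length (by simp)
      simp only [PySem.Chars.lower, List.getElem?_map] at this
      rw [List.getElem?_eq_getElem (by omega)] at this
      simp only [Option.map_some, Option.some.injEq] at this
      rw [this]
      simp
    have hmin : ∀ j, j < w.length → ¬ ([c] <+: t.drop j) := by
      intro j hj hpj
      obtain ⟨r, hr⟩ := hpj
      have htj : t[j]? = some c := by
        have h0 : (t.drop j)[0]? = some c := by rw [← hr]; rfl
        rw [List.getElem?_drop] at h0
        simpa using h0
      have htj' : t[j]'(by omega) = c := by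
        rw [List.getElem?_eq_getElem (by omega)] at htj
        simpa using htj
      have : c ∈ w := by
        have := hget j hj
        rw [htj', hc1] at this
        rw [this]; exact List.getElem_mem _
      exact hcw this
    have hat : [c] <+: t.drop w.length := by
      rw [List.drop_eq_getElem_cons (show w.length < t.length by omega), hgetc]
      exact ⟨t.drop (w.length+1), rfl⟩
    have hne : PySem.Chars.find t [c] ≠ -1 := by
      rw [PySem.Chars.find_ne_neg_one_iff, ← PySem.Chars.isIn_iff_infix,
        ← PySem.Chars.exists_prefix_drop_iff_isIn]
      exact ⟨_, hat⟩
    have h0 : 0 ≤ PySem.Chars.find t [c] := by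
      have := PySem.Chars.neg_one_le_find t [c]; omega
    obtain ⟨hp, hm⟩ := PySem.Chars.find_spec h0
    have hfn : (PySem.Chars.find t [c]).toNat = w.length := by
      rcases lt_trichotomy (PySem.Chars.find t [c]).toNat w.length with hlt | heq | hgt
      · exact absurd hp (hmin _ hlt)
      · exact heq
      · exact absurd hat (hm _ hgt)
    refine ⟨by omega, ?_⟩
    have hmt : PySem.Chars.lower (t.take w.length) = List.take w.length (PySem.Chars.lower t) := by
      simp [PySem.Chars.lower, List.map_take]
    rw [hmt]
    obtain ⟨r2, hr2⟩ := (List.prefix_append w [c]).trans h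
    rw [← hr2, List.take_left]

-- two incomparable literal prefixes cannot both match
theorem pvNotBoth (L p q : List Char) (hpq : ¬ (p <+: q)) (hqp : ¬ (q <+: p))
    (hp : PySem.Chars.startswith L p = true) : PySem.Chars.startswith L q = false := by
  rw [Bool.eq_false_iff, Ne, PySem.Chars.startswith_iff]
  intro hq
  rcases List.prefix_or_prefix_of_prefix ((PySem.Chars.startswith_iff L p).mp hp) hq with h | h
  exacts [hpq h, hqp h]

-- B's whole branch condition for separator c, as A-style prefix tests
theorem pvBCond_iff (t : List Char) (c : Char)
    (hc1 : PySem.Chars.lowerChar c = c)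
    (hc2 : ∀ d, PySem.Chars.lowerChar d = c → d = c)
    (hcs : c ∉ "scene".toList) (hci : c ∉ "id".toList) :
    (PySem.Chars.find t [c] ≠ -1 ∧
      PySem.Chars.lower (PySem.List.slice t none (some (PySem.Chars.find t [c]))) ∈
        ["scene".toList, "id".toList])
    ↔ (PySem.Chars.startswith (PySem.Chars.lower t) ("scene".toList ++ [c]) = true ∨
       PySem.Chars.startswith (PySem.Chars.lower t) ("id".toList ++ [c]) = true) := by
  constructor
  · rintro ⟨hne, hmem⟩
    have h0 : 0 ≤ PySem.Chars.find t [c] := by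
      have := PySem.Chars.neg_one_le_find t [c]; omega
    rw [PySem.List.slice_to t h0] at hmem
    have hle : (PySem.Chars.find t [c]).toNat ≤ t.length := by
      have := PySem.Chars.find_le_length t [c]; omega
    simp only [List.mem_cons, List.not_mem_nil, or_false] at hmem
    rcases hmem with hw | hw
    · left
      have hlen : (PySem.Chars.find t [c]).toNat = "scene".toList.length := by
        have h2 := congrArg List.length hw
        simp only [PySem.Chars.lower, List.length_map, List.length_take] at h2
        have h3 : "scene".toList.length = 5 := by decide
        omega
      exact (pvCond_iff t "scene".toList c hc1 hc2 hcs).mp ⟨by omega, by rw [← hlen]; exact hw⟩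
    · right
      have hlen : (PySem.Chars.find t [c]).toNat = "id".toList.length := by
        have h2 := congrArg List.length hw
        simp only [PySem.Chars.lower, List.length_map, List.length_take] at h2
        have h3 : "id".toList.length = 2 := by decide
        omega
      exact (pvCond_iff t "id".toList c hc1 hc2 hci).mp ⟨by omega, by rw [← hlen]; exact hw⟩
  · intro h
    rcases h with hw | hw
    · obtain ⟨hf, hl⟩ := (pvCond_iff t "scene".toList c hc1 hc2 hcs).mpr hw
      refine ⟨by rw [hf]; decide, ?_⟩
      rw [hf, PySem.List.slice_to t (Int.natCast_nonneg _)]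
      simp only [Int.toNat_natCast]
      rw [hl]
      simp
    · obtain ⟨hf, hl⟩ := (pvCond_iff t "id".toList c hc1 hc2 hci).mpr hw
      refine ⟨by rw [hf]; decide, ?_⟩
      rw [hf, PySem.List.slice_to t (Int.natCast_nonneg _)]
      simp only [Int.toNat_natCast]
      rw [hl]
      simp

-- A and B agree on any stripped token: four-way case split on A's prefix tests
theorem pvMain (t : List Char) :
    pvALoop t (PySem.Chars.lower t) ["scene=".toList, "id=".toList, "scene:".toList, "id:".toList]
    = pvBLoop t ['=', ':'] := by
  have he2 : ∀ d, PySem.Chars.lowerChar d = '=' → d = '=' :=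
    fun d h => (pvLowerChar_eq_iff d '=' (by decide) (by decide)).mp h
  have hco2 : ∀ d, PySem.Chars.lowerChar d = ':' → d = ':' :=
    fun d h => (pvLowerChar_eq_iff d ':' (by decide) (by decide)).mp h
  have hBE := pvBCond_iff t '=' (by decide) he2 (by decide) (by decide)
  have hBC := pvBCond_iff t ':' (by decide) hco2 (by decide) (by decide)
  rw [show ("scene=".toList) = "scene".toList ++ ['='] from by decide,
      show ("id=".toList) = "id".toList ++ ['='] from by decide,
      show ("scene:".toList) = "scene".toList ++ [':'] from by decide,
      show ("id:".toList) = "id".toList ++ [':'] from by decide]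
  by_cases hSE : PySem.Chars.startswith (PySem.Chars.lower t) ("scene".toList ++ ['=']) = true
  · have hSC := pvNotBoth _ _ ("scene".toList ++ [':']) (by decide) (by decide) hSE
    have hIC := pvNotBoth _ _ ("id".toList ++ [':']) (by decide) (by decide) hSE
    obtain ⟨hf, hl⟩ := (pvCond_iff t "scene".toList '=' (by decide) he2 (by decide)).mpr hSE
    rw [show ("scene".toList.length) = 5 from by decide] at hf hl
    have hf5 : PySem.Chars.find t ['='] = (5:Int) := by exact_mod_cast hf
    have hsl : PySem.Chars.lower (PySem.List.slice t none (some (5:Int))) = "scene".toList := by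
      rw [PySem.List.slice_to t (by omega)]; exact hl
    have hBCneg : ¬ (PySem.Chars.find t [':'] ≠ -1 ∧
        PySem.Chars.lower (PySem.List.slice t none (some (PySem.Chars.find t [':']))) ∈
          ["scene".toList, "id".toList]) :=
      fun hc => by
        rcases hBC.mp hc with h | h
        exacts [absurd (h.symm.trans hSC) (by decide), absurd (h.symm.trans hIC) (by decide)]
    have hIE := pvNotBoth _ _ ("id".toList ++ ['=']) (by decide) (by decide) hSE
    have e1 : PySem.Chars.startswith (PySem.Chars.lower t) ['s','c','e','n','e','='] = true := hSE
    have e2 : PySem.Chars.startswith (PySem.Chars.lower t) ['i','d','='] = false := hIE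
    have e3 : PySem.Chars.startswith (PySem.Chars.lower t) ['s','c','e','n','e',':'] = false := hSC
    have e4 : PySem.Chars.startswith (PySem.Chars.lower t) ['i','d',':'] = false := hIC
    simp at hBCneg
    have hC : ¬(¬PySem.Chars.find t [':'] = -1 ∧
        (PySem.Chars.lower (PySem.List.slice t none (some (PySem.Chars.find t [':']))) = ['s','c','e','n','e'] ∨
         PySem.Chars.lower (PySem.List.slice t none (some (PySem.Chars.find t [':']))) = ['i','d'])) :=
      fun hc => hc.2.elim (fun h => (hBCneg hc.1).1 h) (fun h => (hBCneg hc.1).2 h)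
    simp [pvALoop, pvBLoop, e1, e2, e3, e4, hf5, hsl]
    rw [if_neg hC]
  · have hSE' : PySem.Chars.startswith (PySem.Chars.lower t) ("scene".toList ++ ['=']) = false :=
      by simpa using hSE
    by_cases hIE : PySem.Chars.startswith (PySem.Chars.lower t) ("id".toList ++ ['=']) = true
    · have hSC := pvNotBoth _ _ ("scene".toList ++ [':']) (by decide) (by decide) hIE
      have hIC := pvNotBoth _ _ ("id".toList ++ [':']) (by decide) (by decide) hIE
      obtain ⟨hf, hl⟩ := (pvCond_iff t "id".toList '=' (by decide) he2 (by decide)).mpr hIE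
      rw [show ("id".toList.length) = 2 from by decide] at hf hl
      have hf2 : PySem.Chars.find t ['='] = (2:Int) := by exact_mod_cast hf
      have hsl : PySem.Chars.lower (PySem.List.slice t none (some (2:Int))) = "id".toList := by
        rw [PySem.List.slice_to t (by omega)]; exact hl
      have hBCneg : ¬ (PySem.Chars.find t [':'] ≠ -1 ∧
          PySem.Chars.lower (PySem.List.slice t none (some (PySem.Chars.find t [':']))) ∈
            ["scene".toList, "id".toList]) :=
        fun hc => by
          rcases hBC.mp hc with h | h
          exacts [absurd (h.symm.trans hSC) (by decide), absurd (h.symm.trans hIC) (by decide)]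
      have e1 : PySem.Chars.startswith (PySem.Chars.lower t) ['s','c','e','n','e','='] = false := hSE'
      have e2 : PySem.Chars.startswith (PySem.Chars.lower t) ['i','d','='] = true := hIE
      have e3 : PySem.Chars.startswith (PySem.Chars.lower t) ['s','c','e','n','e',':'] = false := hSC
      have e4 : PySem.Chars.startswith (PySem.Chars.lower t) ['i','d',':'] = false := hIC
      simp at hBCneg
      have hC : ¬(¬PySem.Chars.find t [':'] = -1 ∧
          (PySem.Chars.lower (PySem.List.slice t none (some (PySem.Chars.find t [':']))) = ['s','c','e','n','e'] ∨
           PySem.Chars.lower (PySem.List.slice t none (some (PySem.Chars.find t [':']))) = ['i','d'])) :=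
        fun hc => hc.2.elim (fun h => (hBCneg hc.1).1 h) (fun h => (hBCneg hc.1).2 h)
      simp [pvALoop, pvBLoop, e1, e2, e3, e4, hf2, hsl]
      rw [if_neg hC]
    · have hIE' : PySem.Chars.startswith (PySem.Chars.lower t) ("id".toList ++ ['=']) = false :=
        by simpa using hIE
      have hBEneg : ¬ (PySem.Chars.find t ['='] ≠ -1 ∧
          PySem.Chars.lower (PySem.List.slice t none (some (PySem.Chars.find t ['=']))) ∈
            ["scene".toList, "id".toList]) :=
        fun hc => by rcases hBE.mp hc with h | h; exacts [hSE h, hIE h]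
      by_cases hSC : PySem.Chars.startswith (PySem.Chars.lower t) ("scene".toList ++ [':']) = true
      · have hIC := pvNotBoth _ _ ("id".toList ++ [':']) (by decide) (by decide) hSC
        obtain ⟨hf, hl⟩ := (pvCond_iff t "scene".toList ':' (by decide) hco2 (by decide)).mpr hSC
        rw [show ("scene".toList.length) = 5 from by decide] at hf hl
        have hf5 : PySem.Chars.find t [':'] = (5:Int) := by exact_mod_cast hf
        have hsl : PySem.Chars.lower (PySem.List.slice t none (some (5:Int))) = "scene".toList := by
          rw [PySem.List.slice_to t (by omega)]; exact hl
        have e1 : PySem.Chars.startswith (PySem.Chars.lower t) ['s','c','e','n','e','='] = false := hSE'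
        have e2 : PySem.Chars.startswith (PySem.Chars.lower t) ['i','d','='] = false := hIE'
        have e3 : PySem.Chars.startswith (PySem.Chars.lower t) ['s','c','e','n','e',':'] = true := hSC
        have e4 : PySem.Chars.startswith (PySem.Chars.lower t) ['i','d',':'] = false := hIC
        simp at hBEneg
        have hEx : ¬(¬PySem.Chars.find t ['='] = -1 ∧
            (PySem.Chars.lower (PySem.List.slice t none (some (PySem.Chars.find t ['=']))) = ['s','c','e','n','e'] ∨
             PySem.Chars.lower (PySem.List.slice t none (some (PySem.Chars.find t ['=']))) = ['i','d'])) :=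
          fun hc => hc.2.elim (fun h => (hBEneg hc.1).1 h) (fun h => (hBEneg hc.1).2 h)
        simp [pvALoop, pvBLoop, e1, e2, e3, e4, hf5, hsl]
        intro h1 h2 _
        exact h2.elim (fun h => absurd h (hBEneg h1).1) (fun h => absurd h (hBEneg h1).2)
      · have hSC' : PySem.Chars.startswith (PySem.Chars.lower t) ("scene".toList ++ [':']) = false :=
          by simpa using hSC
        by_cases hIC : PySem.Chars.startswith (PySem.Chars.lower t) ("id".toList ++ [':']) = true
        · obtain ⟨hf, hl⟩ := (pvCond_iff t "id".toList ':' (by decide) hco2 (by decide)).mpr hIC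
          rw [show ("id".toList.length) = 2 from by decide] at hf hl
          have hf2 : PySem.Chars.find t [':'] = (2:Int) := by exact_mod_cast hf
          have hsl : PySem.Chars.lower (PySem.List.slice t none (some (2:Int))) = "id".toList := by
            rw [PySem.List.slice_to t (by omega)]; exact hl
          have e1 : PySem.Chars.startswith (PySem.Chars.lower t) ['s','c','e','n','e','='] = false := hSE'
          have e2 : PySem.Chars.startswith (PySem.Chars.lower t) ['i','d','='] = false := hIE'
          have e3 : PySem.Chars.startswith (PySem.Chars.lower t) ['s','c','e','n','e',':'] = false := hSC'
          have e4 : PySem.Chars.startswith (PySem.Chars.lower t) ['i','d',':'] = true := hIC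
          simp at hBEneg
          have hEx : ¬(¬PySem.Chars.find t ['='] = -1 ∧
              (PySem.Chars.lower (PySem.List.slice t none (some (PySem.Chars.find t ['=']))) = ['s','c','e','n','e'] ∨
               PySem.Chars.lower (PySem.List.slice t none (some (PySem.Chars.find t ['=']))) = ['i','d'])) :=
            fun hc => hc.2.elim (fun h => (hBEneg hc.1).1 h) (fun h => (hBEneg hc.1).2 h)
          simp [pvALoop, pvBLoop, e1, e2, e3, e4, hf2, hsl]
          intro h1 h2 _
          exact h2.elim (fun h => absurd h (hBEneg h1).1) (fun h => absurd h (hBEneg h1).2)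
        · have hIC' : PySem.Chars.startswith (PySem.Chars.lower t) ("id".toList ++ [':']) = false :=
            by simpa using hIC
          have hBCneg : ¬ (PySem.Chars.find t [':'] ≠ -1 ∧
              PySem.Chars.lower (PySem.List.slice t none (some (PySem.Chars.find t [':']))) ∈
                ["scene".toList, "id".toList]) :=
            fun hc => by rcases hBC.mp hc with h | h; exacts [hSC h, hIC h]
          have e1 : PySem.Chars.startswith (PySem.Chars.lower t) ['s','c','e','n','e','='] = false := hSE'
          have e2 : PySem.Chars.startswith (PySem.Chars.lower t) ['i','d','='] = false := hIE'
          have e3 : PySem.Chars.startswith (PySem.Chars.lower t) ['s','c','e','n','e',':'] = false := hSC'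
          have e4 : PySem.Chars.startswith (PySem.Chars.lower t) ['i','d',':'] = false := hIC'
          simp at hBEneg hBCneg
          have hEx : ¬(¬PySem.Chars.find t ['='] = -1 ∧
              (PySem.Chars.lower (PySem.List.slice t none (some (PySem.Chars.find t ['=']))) = ['s','c','e','n','e'] ∨
               PySem.Chars.lower (PySem.List.slice t none (some (PySem.Chars.find t ['=']))) = ['i','d'])) :=
            fun hc => hc.2.elim (fun h => (hBEneg hc.1).1 h) (fun h => (hBEneg hc.1).2 h)
          have hC : ¬(¬PySem.Chars.find t [':'] = -1 ∧
              (PySem.Chars.lower (PySem.List.slice t none (some (PySem.Chars.find t [':']))) = ['s','c','e','n','e'] ∨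
               PySem.Chars.lower (PySem.List.slice t none (some (PySem.Chars.find t [':']))) = ['i','d'])) :=
            fun hc => hc.2.elim (fun h => (hBCneg hc.1).1 h) (fun h => (hBCneg hc.1).2 h)
          simp [pvALoop, pvBLoop, e1, e2, e3, e4]
          rw [if_neg hEx, if_neg hC]

-- ===== VERDICT (by name: the statement is the Claim_ definition above) =====
theorem normalize_scene_target_token_py_spec : Claim_equal_normalize_scene_target_token_py := by
  intro target _
  unfold Spec_normalize_scene_target_token_py normalize_scene_target_token_py normalize_scene_target_token_py_alt
  exact congrArg String.ofList (pvMain _)
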